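-- pv_equiv track=rewrite | github.com/martimfasantos/DS | health_domain/classification/data_profiling/data_granularity.py | do_group_4
-- ===== SOURCE A (Python) =====
-- def do_group_4(counts: list) -> list:
--     new_counts = {'[0,50]': 0, '(50,125]': 0, '>100': 0 }
--     for item in counts:
--         if (item[0] in ('[0-25)', '[25-50)')):
--             new_counts['[0,50]'] += item[1]
--         elif (item[0] in ('[50-75)', '[75-100)', '[100-125)')):
--             new_counts['(50,125]'] += item[1]
--         else:
--             new_counts['>100'] += item[1]
--     return new_counts
-- ===== SOURCE B (Python) =====
-- def do_group_4(counts: list) -> list: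
--     group1 = {'[0-25)', '[25-50)'}
--     group2 = {'[50-75)', '[75-100)', '[100-125)'}
--     b1 = sum(item[1] for item in counts if item[0] in group1)
--     b2 = sum(item[1] for item in counts if item[0] in group2)
--     b3 = sum(item[1] for item in counts if item[0] not in group1 and item[0] not in group2)
--     return {'[0,50]': b1, '(50,125]': b2, '>100': b3}
-- ===== Notes on version B (the rewrite author's own statement) =====
-- stated objective: alternative
-- what changed: Replaces the single branching loop that mutates a dict in place with three independent filtered sums (one per bucket, membership in two label sets), assembling the result dict once at the end.
import Mathlib
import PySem

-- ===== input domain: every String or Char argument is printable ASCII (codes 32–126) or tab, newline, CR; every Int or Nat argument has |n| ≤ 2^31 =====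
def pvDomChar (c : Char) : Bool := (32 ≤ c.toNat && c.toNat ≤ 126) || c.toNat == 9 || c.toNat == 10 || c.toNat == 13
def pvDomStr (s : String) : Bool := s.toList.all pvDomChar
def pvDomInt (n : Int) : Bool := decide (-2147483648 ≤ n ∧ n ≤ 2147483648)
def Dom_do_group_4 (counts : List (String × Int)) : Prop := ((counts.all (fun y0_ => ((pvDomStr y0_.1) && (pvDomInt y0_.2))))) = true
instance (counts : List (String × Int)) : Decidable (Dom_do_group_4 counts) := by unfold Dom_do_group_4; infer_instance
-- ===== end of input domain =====

-- B replaces A's single branching loop over a mutated dict by three independent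
-- filtered sums, one per bucket (objective: alternative decomposition, same cost).

-- ===== PORT A =====
-- one loop step of A: branch on the label, bump the matching bucket of the dict
def pvStepA (d : PySem.Dict String Int) (item : String × Int) : PySem.Dict String Int :=
  if item.1 = "[0-25)" ∨ item.1 = "[25-50)" then d.modify "[0,50]" 0 (· + item.2)
  else if item.1 = "[50-75)" ∨ item.1 = "[75-100)" ∨ item.1 = "[100-125)" then
    d.modify "(50,125]" 0 (· + item.2)
  else d.modify ">100" 0 (· + item.2)

def do_group_4 (counts : List (String × Int)) : List (String × Int) :=
  (counts.foldl pvStepA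
    (PySem.Dict.ofList [("[0,50]", 0), ("(50,125]", 0), (">100", 0)])).items

-- ===== PORT B =====
def pvG1 : List String := ["[0-25)", "[25-50)"]
def pvG2 : List String := ["[50-75)", "[75-100)", "[100-125)"]

def do_group_4_alt (counts : List (String × Int)) : List (String × Int) :=
  let b1 := ((counts.filter (fun p => pvG1.contains p.1)).map Prod.snd).sum
  let b2 := ((counts.filter (fun p => pvG2.contains p.1)).map Prod.snd).sum
  let b3 := ((counts.filter (fun p => !pvG1.contains p.1 && !pvG2.contains p.1)).map Prod.snd).sum
  [("[0,50]", b1), ("(50,125]", b2), (">100", b3)]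

-- ===== PRECONDITION & SPEC =====
def Spec_do_group_4 (counts : List (String × Int)) (out : List (String × Int)) : Prop := out = do_group_4_alt counts
instance (counts : List (String × Int)) (out : List (String × Int)) : Decidable (Spec_do_group_4 counts out) := by unfold Spec_do_group_4; infer_instance

-- ===== CLAIM (what is proved, stated in full; the proofs are below) =====
def Claim_equal_do_group_4 : Prop := ∀ (counts : List (String × Int)), Dom_do_group_4 counts → Spec_do_group_4 counts (do_group_4 counts)

-- ===== LEMMAS AND PROOFS =====

-- loop invariant: A's fold over the 3-key dict adds each bucket's filtered sum
lemma pv_fold_inv (counts : List (String × Int)) : ∀ (a b c : Int),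
    counts.foldl pvStepA (PySem.Dict.mk [("[0,50]", a), ("(50,125]", b), (">100", c)]) =
    PySem.Dict.mk
      [("[0,50]", a + ((counts.filter (fun p => pvG1.contains p.1)).map Prod.snd).sum),
       ("(50,125]", b + ((counts.filter (fun p => pvG2.contains p.1)).map Prod.snd).sum),
       (">100", c + ((counts.filter (fun p => !pvG1.contains p.1 && !pvG2.contains p.1)).map Prod.snd).sum)] := by
  induction counts with
  | nil => intro a b c; simp
  | cons x xs ih =>
    intro a b c
    by_cases h1 : x.1 = "[0-25)" ∨ x.1 = "[25-50)"
    · have hs : pvStepA (PySem.Dict.mk [("[0,50]", a), ("(50,125]", b), (">100", c)]) x =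
          PySem.Dict.mk [("[0,50]", a + x.2), ("(50,125]", b), (">100", c)] := by
        simp [pvStepA, h1, PySem.Dict.modify, PySem.Dict.insert, PySem.Dict.contains, PySem.Dict.getD, PySem.Dict.get?]
      have hg1 : x.1 ∈ pvG1 := by
        rcases h1 with h | h <;> simp [pvG1, h]
      have hg2 : x.1 ∉ pvG2 := by
        rcases h1 with h | h <;> simp [pvG2, h]
      simp only [List.foldl_cons, hs, ih, List.filter_cons]
      simp [hg1, hg2, add_assoc]
    · by_cases h2 : x.1 = "[50-75)" ∨ x.1 = "[75-100)" ∨ x.1 = "[100-125)"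
      · have hs : pvStepA (PySem.Dict.mk [("[0,50]", a), ("(50,125]", b), (">100", c)]) x =
            PySem.Dict.mk [("[0,50]", a), ("(50,125]", b + x.2), (">100", c)] := by
          simp [pvStepA, h1, h2, PySem.Dict.modify, PySem.Dict.insert, PySem.Dict.contains, PySem.Dict.getD, PySem.Dict.get?]
        have hg1 : x.1 ∉ pvG1 := by
          push Not at h1; simp [pvG1, h1.1, h1.2]
        have hg2 : x.1 ∈ pvG2 := by
          rcases h2 with h | h | h <;> simp [pvG2, h]
        simp only [List.foldl_cons, hs, ih, List.filter_cons]
        simp [hg1, hg2, add_assoc]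
      · have hs : pvStepA (PySem.Dict.mk [("[0,50]", a), ("(50,125]", b), (">100", c)]) x =
            PySem.Dict.mk [("[0,50]", a), ("(50,125]", b), (">100", c + x.2)] := by
          simp [pvStepA, h1, h2, PySem.Dict.modify, PySem.Dict.insert, PySem.Dict.contains, PySem.Dict.getD, PySem.Dict.get?]
        have hg1 : x.1 ∉ pvG1 := by
          push Not at h1; simp [pvG1, h1.1, h1.2]
        have hg2 : x.1 ∉ pvG2 := by
          push Not at h2; simp [pvG2, h2.1, h2.2.1, h2.2.2]
        simp only [List.foldl_cons, hs, ih, List.filter_cons]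
        simp [hg1, hg2, add_assoc]

-- ===== VERDICT (by name: the statement is the Claim_ definition above) =====
theorem do_group_4_spec : Claim_equal_do_group_4 := by
  intro counts _
  show do_group_4 counts = do_group_4_alt counts
  unfold do_group_4 do_group_4_alt
  have h0 : PySem.Dict.ofList ([("[0,50]", (0:Int)), ("(50,125]", 0), (">100", 0)]) =
      PySem.Dict.mk [("[0,50]", 0), ("(50,125]", 0), (">100", 0)] := by decide
  rw [h0, pv_fold_inv counts 0 0 0]
  simp
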